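-- pv_equiv track=rewrite | github.com/vypxl/aoc | 2019/Day22.py | slam
-- ===== SOURCE A (Python) =====
-- NEW = 0
--
-- CUT = 1
--
-- INC = 2
--
-- def slam(deck, instructions):
--     for op, par in instructions:
--         if op == NEW:
--             deck = list(reversed(deck))
--         elif op == CUT:
--             deck = deck[par:] + deck[:par]
--         elif op == INC:
--             l = len(deck)
--             newdeck = [None] * l
--             pos = 0
--             while 1:
--                 if not deck:
--                     break
--                 newdeck[pos] = deck.pop(0)
--                 pos = (pos + par) % l
--             deck = newdeck
--     return deck
-- ===== SOURCE B (Python) =====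
-- NEW = 0
--
-- CUT = 1
--
-- INC = 2
--
-- def slam(deck, instructions):
--     # Compose all instructions into one affine position map (a*p + b) % l,
--     # then place every card once: O(n + k) instead of A's O(k * n^2).
--     l = len(deck)
--     if l == 0:
--         return []
--     a, b = 1, 0  # card at original index p ends up at position (a*p + b) % l
--     for op, par in instructions:
--         if op == NEW:
--             a, b = -a % l, (l - 1 - b) % l
--         elif op == CUT:
--             s = max(-l, min(l, par))  # Python slices clamp: a cut beyond the deck is a no-op
--             b = (b - s) % l
--         elif op == INC:
--             a, b = a * par % l, b * par % l
--     res = [0] * l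
--     for p, c in enumerate(deck):
--         res[(a * p + b) % l] = c
--     return res
-- ===== Notes on version B (the rewrite author's own statement) =====
-- stated objective: alternative
-- what changed: B composes all shuffle instructions into a single affine index map (a*p+b) mod l and materialises the deck with one scatter pass, instead of A's per-instruction list rebuilding with a pop(0) loop for 'deal with increment'.
-- outside the precondition, e.g. on slam([0, 1, 2, 3], [(2, 2)]): A returns [2, None, 3, None], B returns [2, 0, 3, 0]
import Mathlib
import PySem

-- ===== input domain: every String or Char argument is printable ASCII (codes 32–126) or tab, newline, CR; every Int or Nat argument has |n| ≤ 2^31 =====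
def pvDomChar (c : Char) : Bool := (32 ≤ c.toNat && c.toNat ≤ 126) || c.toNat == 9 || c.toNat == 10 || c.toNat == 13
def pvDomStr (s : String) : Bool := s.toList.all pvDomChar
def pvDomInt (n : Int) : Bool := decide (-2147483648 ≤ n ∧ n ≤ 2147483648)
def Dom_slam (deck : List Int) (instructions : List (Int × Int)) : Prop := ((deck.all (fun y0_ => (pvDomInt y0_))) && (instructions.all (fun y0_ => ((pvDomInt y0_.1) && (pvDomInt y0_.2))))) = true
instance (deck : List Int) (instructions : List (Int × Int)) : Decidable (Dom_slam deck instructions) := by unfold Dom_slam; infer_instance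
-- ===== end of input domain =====

-- B composes all shuffle instructions into one affine position map (a*p+b) mod l and places each
-- card once, replacing A's per-instruction list rebuilding (pop(0) loop for op INC).
-- A mutates its deck argument in place (pop(0)) while B does not: the equivalence proved here is
-- about the RETURN value only.

-- ===== PORT A =====
-- the 'while 1: ... newdeck[pos] = deck.pop(0); pos = (pos + par) % l' loop of A.
-- Python's [None] * l is ported as 'List.replicate l 0': Pre_slam guarantees every slot is
-- overwritten (otherwise A's result keeps a None and is not a list of ints, and is excluded).
-- pos is always in [0, l) when a write happens, so '.toNat' / 'List.set' are exact here.
def slamIncLoop (par l : Int) : List Int → List Int → Int → List Int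
  | [], nd, _ => nd
  | c :: rest, nd, pos => slamIncLoop par l rest (nd.set pos.toNat c) (PySem.Int.mod (pos + par) l)

def slamStep (deck : List Int) (ins : Int × Int) : List Int :=
  if ins.1 = 0 then deck.reverse
  else if ins.1 = 1 then
    PySem.List.slice deck (some ins.2) none ++ PySem.List.slice deck none (some ins.2)
  else if ins.1 = 2 then
    slamIncLoop ins.2 (deck.length : Int) deck (List.replicate deck.length 0) 0
  else deck

def slam (deck : List Int) (instructions : List (Int × Int)) : List Int :=
  instructions.foldl slamStep deck

-- ===== PORT B =====
-- affine accumulator: the card at original index p ends up at position (a*p + b) % l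
def slamAff (l : Int) (ab : Int × Int) (ins : Int × Int) : Int × Int :=
  if ins.1 = 0 then (PySem.Int.mod (-ab.1) l, PySem.Int.mod (l - 1 - ab.2) l)
  else if ins.1 = 1 then (ab.1, PySem.Int.mod (ab.2 - max (-l) (min l ins.2)) l)
  else if ins.1 = 2 then (PySem.Int.mod (ab.1 * ins.2) l, PySem.Int.mod (ab.2 * ins.2) l)
  else ab

def slam_alt (deck : List Int) (instructions : List (Int × Int)) : List Int :=
  if deck.length = 0 then []
  else
    let l : Int := deck.length
    let ab := instructions.foldl (slamAff l) (1, 0)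
    (PySem.List.enumerate deck 0).foldl
      (fun res pc => res.set (PySem.Int.mod (ab.1 * pc.1 + ab.2) l).toNat pc.2)
      (List.replicate deck.length 0)

-- ===== PRECONDITION & SPEC =====
-- Pre_slam excludes inputs where some 'deal with increment' parameter is not coprime to the deck
-- size: there A's scatter loop overwrites some slots and leaves others as None, so A returns a
-- list containing None — not a value of type list[int].
def Pre_slam (deck : List Int) (instructions : List (Int × Int)) : Prop :=
  deck = [] ∨ ∀ p ∈ instructions, p.1 = 2 → Int.gcd p.2 deck.length = 1
instance (deck : List Int) (instructions : List (Int × Int)) : Decidable (Pre_slam deck instructions) := by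
  unfold Pre_slam; infer_instance
def pvWitness_slam : List Int × (List (Int × Int)) := ([3, 1, 4, 1, 5], [(0, 0), (1, 2), (2, 3), (1, -1)])
def Spec_slam (deck : List Int) (instructions : List (Int × Int)) (out : List Int) : Prop := out = slam_alt deck instructions
instance (deck : List Int) (instructions : List (Int × Int)) (out : List Int) : Decidable (Spec_slam deck instructions out) := by unfold Spec_slam; infer_instance

-- ===== CLAIM (what is proved, stated in full; the proofs are below) =====
def Claim_equal_slam : Prop := ∀ (deck : List Int) (instructions : List (Int × Int)), Dom_slam deck instructions → Pre_slam deck instructions → Spec_slam deck instructions (slam deck instructions)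

-- ===== LEMMAS AND PROOFS =====

def pvScatter (ps : List Nat) (cs : List Int) (acc : List Int) : List Int :=
  (ps.zip cs).foldl (fun acc pc => acc.set pc.1 pc.2) acc

theorem pvScatter_cons (p : Nat) (ps : List Nat) (c : Int) (cs acc : List Int) :
    pvScatter (p :: ps) (c :: cs) acc = pvScatter ps cs (acc.set p c) := rfl

theorem pvScatter_length (ps : List Nat) (cs : List Int) (acc : List Int) :
    (pvScatter ps cs acc).length = acc.length := by
  induction ps generalizing cs acc with
  | nil => rfl
  | cons p ps ih =>
    cases cs with
    | nil => rfl
    | cons c cs => rw [pvScatter_cons, ih, List.length_set]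

theorem pvScatter_getElem?_of_not_mem {ps : List Nat} {cs : List Int} {acc : List Int} {j : Nat}
    (h : j ∉ ps) : (pvScatter ps cs acc)[j]? = acc[j]? := by
  induction ps generalizing cs acc with
  | nil => rfl
  | cons p ps ih =>
    cases cs with
    | nil => rfl
    | cons c cs =>
      rw [pvScatter_cons, ih (fun hm => h (List.mem_cons_of_mem _ hm)),
        List.getElem?_set_ne (fun he => h (by rw [he]; exact List.mem_cons_self ..))]

theorem pvScatter_getElem? {ps : List Nat} {cs : List Int} {acc : List Int} {t : Nat}
    (hnd : ps.Nodup) (ht : t < ps.length) (ht2 : t < cs.length) (hp : ps[t] < acc.length) :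
    (pvScatter ps cs acc)[ps[t]]? = some cs[t] := by
  induction ps generalizing cs acc t with
  | nil => simp at ht
  | cons p ps ih =>
    cases cs with
    | nil => simp at ht2
    | cons c cs =>
      rw [pvScatter_cons]
      cases t with
      | zero =>
        simp only [List.getElem_cons_zero] at hp ⊢
        rw [pvScatter_getElem?_of_not_mem (List.nodup_cons.mp hnd).1,
          List.getElem?_set_self (by simpa using hp)]
      | succ t =>
        simp only [List.getElem_cons_succ] at hp ⊢
        exact ih (List.nodup_cons.mp hnd).2 (by simpa using ht) (by simpa using ht2)
          (by simpa using hp)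

def pvPos (a b L : Int) (p : Nat) : Nat := ((a * p + b) % L).toNat

theorem pvPos_lt {L : Int} (a b : Int) (p : Nat) (hL : 0 < L) : pvPos a b L p < L.toNat := by
  have h1 := Int.emod_nonneg (a * p + b) (by omega : L ≠ 0)
  have h2 := Int.emod_lt_of_pos (a * p + b) hL
  unfold pvPos; omega

theorem pvPos_cast {a b L : Int} (p : Nat) (hL : 0 < L) :
    (pvPos a b L p : Int) = (a * p + b) % L := by
  have h1 := Int.emod_nonneg (a * p + b) (by omega : L ≠ 0)
  unfold pvPos; omega

theorem pvPos_inj {a b L : Int} {p q : Nat} (hL : 0 < L) (hcop : IsCoprime L a)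
    (hp : p < L.toNat) (hq : q < L.toNat) (h : pvPos a b L p = pvPos a b L q) : p = q := by
  have h' : (a * p + b) % L = (a * q + b) % L := by
    rw [← pvPos_cast p hL, ← pvPos_cast q hL, h]
  have hdvd : L ∣ a * ((q : Int) - p) := by
    have hd := Int.ModEq.dvd (show (a * p + b : Int) ≡ a * q + b [ZMOD L] from h')
    have : (a * q + b) - (a * p + b) = a * ((q : Int) - p) := by ring
    rwa [this] at hd
  have h0 : (q : Int) - p = 0 :=
    Int.eq_zero_of_abs_lt_dvd (hcop.dvd_of_dvd_mul_left hdvd)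
      (abs_sub_lt_iff.mpr ⟨by omega, by omega⟩)
  omega

theorem pvPos_surj {a b L : Int} (hL : 0 < L) (hcop : IsCoprime L a) (j : Nat)
    (hj : j < L.toNat) : ∃ p, p < L.toNat ∧ pvPos a b L p = j := by
  have hsurj := Finite.surjective_of_injective
    (f := fun p : Fin L.toNat => (⟨pvPos a b L p, pvPos_lt a b p hL⟩ : Fin L.toNat))
    (fun p q hpq => by
      apply Fin.ext
      exact pvPos_inj hL hcop p.isLt q.isLt (by simpa using congrArg Fin.val hpq))
  obtain ⟨p, hp⟩ := hsurj ⟨j, hj⟩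
  exact ⟨p.val, p.isLt, by simpa using congrArg Fin.val hp⟩

def pvM (a b : Int) (deck : List Int) : List Int :=
  pvScatter ((List.range deck.length).map (pvPos a b deck.length)) deck
    (List.replicate deck.length 0)

theorem pvM_length (a b : Int) (deck : List Int) : (pvM a b deck).length = deck.length := by
  rw [pvM, pvScatter_length, List.length_replicate]

theorem pvM_getElem? {a b : Int} {deck : List Int} (hcop : IsCoprime (deck.length : Int) a)
    {p : Nat} (hp : p < deck.length) :
    (pvM a b deck)[pvPos a b deck.length p]? = deck[p]? := by
  have hL : (0 : Int) < deck.length := by exact_mod_cast Nat.zero_lt_of_lt hp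
  have hps : ((List.range deck.length).map (pvPos a b deck.length))[p]'(by simpa using hp)
      = pvPos a b deck.length p := by simp
  have := pvScatter_getElem? (ps := (List.range deck.length).map (pvPos a b deck.length))
    (cs := deck) (acc := List.replicate deck.length 0) (t := p)
    (List.Nodup.map_on
      (fun x hx y hy hxy => pvPos_inj hL hcop
        (by simpa using List.mem_range.mp hx) (by simpa using List.mem_range.mp hy) hxy)
      (List.nodup_range))
    (by simpa using hp) hp (by simp [hps]; simpa using pvPos_lt a b p hL)
  rw [hps] at this
  rw [pvM, this, List.getElem?_eq_getElem hp]

theorem pvM_ext {a b : Int} {deck xs : List Int} (hl : 0 < deck.length)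
    (hcop : IsCoprime (deck.length : Int) a)
    (hlen : xs.length = deck.length)
    (hget : ∀ p, p < deck.length → xs[pvPos a b deck.length p]? = deck[p]?) :
    xs = pvM a b deck := by
  have hL : (0 : Int) < deck.length := by exact_mod_cast hl
  apply List.ext_getElem?
  intro j
  by_cases hj : j < deck.length
  · obtain ⟨p, hp, hpj⟩ := pvPos_surj hL hcop j (by simpa using hj)
    rw [← hpj, hget p (by simpa using hp), pvM_getElem? hcop (by simpa using hp)]
  · rw [List.getElem?_eq_none (by omega), List.getElem?_eq_none (by rw [pvM_length]; omega)]

theorem pvCoprime_emod {L x : Int} (h : IsCoprime L x) : IsCoprime L (x % L) := by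
  have h2 := IsCoprime.add_mul_left_right h (-(x / L))
  have h3 : x + L * -(x / L) = x % L := by rw [Int.emod_def]; ring
  rwa [h3] at h2

theorem pvM_base {deck : List Int} (hl : 0 < deck.length) : deck = pvM 1 0 deck := by
  apply pvM_ext hl (isCoprime_one_right)
  · rfl
  · intro p hp
    have : pvPos 1 0 (deck.length : Int) p = p := by
      unfold pvPos
      rw [one_mul, add_zero, Int.emod_eq_of_lt (by omega) (by exact_mod_cast hp)]
      simp
    rw [this]

theorem pvStepNEW {a b : Int} {deck : List Int} (hl : 0 < deck.length)
    (hcop : IsCoprime (deck.length : Int) a) :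
    (pvM a b deck).reverse =
      pvM ((-a) % (deck.length : Int)) (((deck.length : Int) - 1 - b) % (deck.length : Int)) deck := by
  set L : Int := (deck.length : Int) with hLdef
  have hL : 0 < L := by rw [hLdef]; exact_mod_cast hl
  apply pvM_ext hl (pvCoprime_emod hcop.neg_right)
  · rw [List.length_reverse, pvM_length]
  · intro p hp
    set j := pvPos ((-a) % L) ((L - 1 - b) % L) L p with hjdef
    have hjl : j < deck.length := by
      have := pvPos_lt ((-a) % L) ((L - 1 - b) % L) p hL
      omega
    set x := (a * p + b) % L with hxdef
    have hx0 : 0 ≤ x := Int.emod_nonneg _ (by omega)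
    have hxL : x < L := Int.emod_lt_of_pos _ hL
    have hjx : (j : Int) = L - 1 - x := by
      have hmod : ((-a) % L * p + (L - 1 - b) % L) ≡ L - 1 - x [ZMOD L] := by
        calc ((-a) % L * p + (L - 1 - b) % L)
            ≡ (-a) * p + (L - 1 - b) [ZMOD L] :=
              ((Int.mod_modEq _ _).mul_right _).add (Int.mod_modEq _ _)
          _ ≡ L - 1 - x [ZMOD L] := by
              have hx : x ≡ a * p + b [ZMOD L] := Int.mod_modEq _ _
              have := (Int.ModEq.refl (L - 1)).sub hx
              have heq : (-a : Int) * p + (L - 1 - b) = L - 1 - (a * p + b) := by ring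
              rw [heq]
              exact this.symm
      rw [hjdef, pvPos_cast p hL, (show _ = _ from hmod),
        Int.emod_eq_of_lt (by omega) (by omega)]
    have hidx : deck.length - 1 - j = pvPos a b L p := by
      have hcast : (pvPos a b L p : Int) = x := pvPos_cast p hL
      omega
    rw [List.getElem?_reverse (by rw [pvM_length]; exact hjl), pvM_length, hidx,
      pvM_getElem? hcop hp]

theorem pvStepCUT {a b par : Int} {deck : List Int} (hl : 0 < deck.length)
    (hcop : IsCoprime (deck.length : Int) a) :
    PySem.List.slice (pvM a b deck) (some par) none ++
        PySem.List.slice (pvM a b deck) none (some par) =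
      pvM a ((b - max (-(deck.length : Int)) (min (deck.length : Int) par)) % (deck.length : Int))
        deck := by
  set L : Int := (deck.length : Int) with hLdef
  have hL : 0 < L := by rw [hLdef]; exact_mod_cast hl
  set M := pvM a b deck with hMdef
  have hMlen : M.length = deck.length := pvM_length a b deck
  set s : Int := max (-L) (min L par) with hsdef
  obtain ⟨t, htl, hrot, hts⟩ :
      ∃ t : Nat, t ≤ deck.length ∧
        PySem.List.slice M (some par) none ++ PySem.List.slice M none (some par) = M.rotate t ∧
        (t : Int) ≡ s [ZMOD L] := by
    rcases le_or_gt 0 par with hpar | hpar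
    · rw [PySem.List.slice_from M hpar, PySem.List.slice_to M hpar]
      rcases le_or_gt par L with hle | hgt
      · refine ⟨par.toNat, by omega, ?_, ?_⟩
        · rw [List.rotate_eq_drop_append_take (by omega)]
        · have : s = par := by rw [hsdef]; omega
          rw [this, Int.toNat_of_nonneg hpar]
      · refine ⟨0, by omega, ?_, ?_⟩
        · rw [List.rotate_zero, List.drop_eq_nil_of_le (by omega),
            List.take_of_length_le (by omega), List.nil_append]
        · have : s = L := by rw [hsdef]; omega
          rw [this]
          exact (Int.modEq_zero_iff_dvd.mpr dvd_rfl).symm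
    · have hk : 0 < (-par).toNat := by omega
      have hpark : par = -((-par).toNat : Int) := by omega
      rw [hpark, PySem.List.slice_from_neg_natCast M (-par).toNat hk, PySem.List.slice_to_neg_natCast M (-par).toNat hk]
      refine ⟨M.length - (-par).toNat, by omega, ?_, ?_⟩
      · rw [List.rotate_eq_drop_append_take (by omega)]
      · rcases le_or_gt (-par).toNat deck.length with hle | hgt
        · have : s = par := by rw [hsdef]; omega
          rw [this]
          have hcast : ((M.length - (-par).toNat : Nat) : Int) = L - (-par).toNat := by
            rw [hMlen]; omega
          rw [hcast]
          have : L - ((-par).toNat : Int) = par + L := by omega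
          rw [this]
          have h2 : (par + L) ≡ par + 0 [ZMOD L] :=
            (Int.ModEq.refl par).add (Int.modEq_zero_iff_dvd.mpr dvd_rfl)
          simp only [add_zero] at h2
          exact h2
        · have hs : s = -L := by rw [hsdef]; omega
          have hcast : ((M.length - (-par).toNat : Nat) : Int) = 0 := by
            rw [hMlen]; omega
          rw [hs, hcast]
          exact (Int.modEq_zero_iff_dvd.mpr (dvd_neg.mpr dvd_rfl)).symm
  rw [hrot]
  apply pvM_ext hl hcop
  · rw [List.length_rotate, hMlen]
  · intro p hp
    set j := pvPos a ((b - s) % L) L p with hjdef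
    have hjl : j < M.length := by
      have := pvPos_lt a ((b - s) % L) p hL
      omega
    rw [List.getElem?_rotate hjl, hMlen]
    have hidx : (j + t) % deck.length = pvPos a b L p := by
      have hj : (j : Int) = (a * p + (b - s) % L) % L := pvPos_cast p hL
      have hmod : ((j : Int) + t) ≡ a * p + b [ZMOD L] := by
        calc ((j : Int) + t) ≡ (a * p + (b - s) % L) % L + s [ZMOD L] :=
              (Int.ModEq.refl _).add hts |>.trans (by rw [hj])
          _ ≡ (a * p + (b - s)) + s [ZMOD L] :=
              ((Int.mod_modEq _ _).trans ((Int.ModEq.refl _).add (Int.mod_modEq _ _))).add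
                (Int.ModEq.refl s)
          _ ≡ a * p + b [ZMOD L] := by rw [show a * ↑p + (b - s) + s = a * ↑p + b by ring]
      apply Nat.cast_injective (R := Int)
      push_cast
      rw [← hLdef]
      conv_rhs => rw [pvPos_cast p hL]
      exact (show _ = _ from hmod)
    rw [hidx, pvM_getElem? hcop hp]

theorem pvIncLoop_eq_scatter {par L : Int} (hL : 0 < L) :
    ∀ (xs nd : List Int) (pos : Int), 0 ≤ pos → pos < L →
      slamIncLoop par L xs nd pos =
        pvScatter ((List.range xs.length).map (fun t : Nat => ((pos + (t : Int) * par) % L).toNat)) xs nd := by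
  intro xs
  induction xs with
  | nil => intro nd pos _ _; rfl
  | cons c rest ih =>
    intro nd pos hpos0 hposL
    have hmodeq : PySem.Int.mod (pos + par) L = (pos + par) % L :=
      PySem.Int.mod_eq_emod_of_pos (by omega)
    have h0 : (0 : Int) ≤ (pos + par) % L := Int.emod_nonneg _ (by omega)
    have h1 : (pos + par) % L < L := Int.emod_lt_of_pos _ hL
    rw [slamIncLoop, hmodeq, ih _ _ h0 h1]
    rw [List.length_cons, List.range_succ_eq_map, List.map_cons, List.map_map]
    rw [show ((pos + (0 : Nat) * par) % L).toNat = pos.toNat by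
      rw [Nat.cast_zero, zero_mul, add_zero, Int.emod_eq_of_lt hpos0 hposL]]
    rw [pvScatter_cons]
    congr 1
    apply List.map_congr_left
    intro t _
    simp only [Function.comp_apply]
    congr 1
    have : ((pos + par) % L + (t : Int) * par) ≡ pos + (t.succ : Int) * par [ZMOD L] := by
      calc ((pos + par) % L + (t : Int) * par) ≡ (pos + par) + t * par [ZMOD L] :=
            (Int.mod_modEq _ _).add (Int.ModEq.refl _)
        _ ≡ pos + (t.succ : Int) * par [ZMOD L] := by
            rw [show pos + par + (t : Int) * par = pos + (t.succ : Int) * par by push_cast; ring]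
    exact (show _ = _ from this)

theorem pvStepINC {a b par : Int} {deck : List Int} (hl : 0 < deck.length)
    (hcop : IsCoprime (deck.length : Int) a) (hpar : IsCoprime (deck.length : Int) par) :
    slamIncLoop par ((pvM a b deck).length : Int) (pvM a b deck)
        (List.replicate (pvM a b deck).length 0) 0 =
      pvM ((a * par) % (deck.length : Int)) ((b * par) % (deck.length : Int)) deck := by
  set L : Int := (deck.length : Int) with hLdef
  have hL : 0 < L := by rw [hLdef]; exact_mod_cast hl
  have hMlen : (pvM a b deck).length = deck.length := pvM_length a b deck
  rw [hMlen, ← hLdef, pvIncLoop_eq_scatter hL _ _ 0 le_rfl hL, hMlen]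
  have hfun : (fun t : Nat => (((0 : Int) + (t : Int) * par) % L).toNat) = pvPos par 0 L := by
    funext t
    unfold pvPos
    rw [zero_add, add_zero, mul_comm]
  rw [hfun]
  apply pvM_ext hl (pvCoprime_emod (hcop.mul_right hpar))
  · rw [pvScatter_length, List.length_replicate]
  · intro p hp
    set x := pvPos a b L p with hxdef
    have hxl : x < deck.length := by
      have := pvPos_lt a b p hL
      omega
    have hidx : pvPos ((a * par) % L) ((b * par) % L) L p = pvPos par 0 L x := by
      have hx : (x : Int) = (a * p + b) % L := pvPos_cast p hL
      have hmod : (par * x + 0 : Int) ≡ ((a * par) % L) * p + (b * par) % L [ZMOD L] := by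
        calc (par * x + 0 : Int) ≡ par * ((a * p + b) % L) [ZMOD L] := by rw [hx, add_zero]
          _ ≡ par * (a * p + b) [ZMOD L] := (Int.mod_modEq _ _).mul_left par
          _ ≡ (a * par) * p + (b * par) [ZMOD L] := by
              rw [show par * (a * ↑p + b) = a * par * ↑p + b * par by ring]
          _ ≡ ((a * par) % L) * p + (b * par) % L [ZMOD L] :=
              (((Int.mod_modEq _ _).mul_right _).add (Int.mod_modEq _ _)).symm
      unfold pvPos
      congr 1
      exact (show _ = _ from hmod).symm
    rw [hidx]
    -- scatter lookup at position pvPos par 0 L x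
    have hps : ((List.range deck.length).map (pvPos par 0 L))[x]'(by simpa using hxl)
        = pvPos par 0 L x := by simp
    have hnd : ((List.range deck.length).map (pvPos par 0 L)).Nodup :=
      List.Nodup.map_on
        (fun u hu v hv huv => pvPos_inj hL hpar
          (by simp only [hLdef, Int.toNat_natCast]; exact List.mem_range.mp hu)
          (by simp only [hLdef, Int.toNat_natCast]; exact List.mem_range.mp hv) huv)
        List.nodup_range
    have := pvScatter_getElem? (ps := (List.range deck.length).map (pvPos par 0 L))
      (cs := pvM a b deck) (acc := List.replicate deck.length 0) (t := x)
      hnd (by simpa using hxl) (by omega)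
      (by rw [hps, List.length_replicate]; exact Nat.lt_of_lt_of_le (pvPos_lt par 0 x hL) (by omega))
    rw [hps] at this
    rw [this, ← List.getElem?_eq_getElem (by omega : x < (pvM a b deck).length),
      hxdef, pvM_getElem? hcop hp]

theorem pvRun {deck : List Int} (hl : 0 < deck.length) :
    ∀ (ins : List (Int × Int)) (a b : Int),
      (∀ p ∈ ins, p.1 = 2 → Int.gcd p.2 (deck.length : Int) = 1) →
      IsCoprime (deck.length : Int) a →
      ins.foldl slamStep (pvM a b deck) =
        pvM (ins.foldl (slamAff (deck.length : Int)) (a, b)).1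
          (ins.foldl (slamAff (deck.length : Int)) (a, b)).2 deck := by
  intro ins
  induction ins with
  | nil => intro a b _ _; rfl
  | cons i rest ih =>
    intro a b hg hcop
    have hL : (0 : Int) < (deck.length : Int) := by exact_mod_cast hl
    have hMlen : (pvM a b deck).length = deck.length := pvM_length a b deck
    have hrest : ∀ p ∈ rest, p.1 = 2 → Int.gcd p.2 (deck.length : Int) = 1 :=
      fun p hp => hg p (List.mem_cons_of_mem _ hp)
    rw [List.foldl_cons, List.foldl_cons]
    by_cases h0 : i.1 = 0
    · rw [show slamStep (pvM a b deck) i = (pvM a b deck).reverse by rw [slamStep, if_pos h0],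
        show slamAff (deck.length : Int) (a, b) i =
          ((-a) % (deck.length : Int),
           ((deck.length : Int) - 1 - b) % (deck.length : Int)) by
          rw [slamAff, if_pos h0, PySem.Int.mod_eq_emod_of_pos hL, PySem.Int.mod_eq_emod_of_pos hL],
        pvStepNEW hl hcop]
      exact ih _ _ hrest (pvCoprime_emod hcop.neg_right)
    · by_cases h1 : i.1 = 1
      · rw [show slamStep (pvM a b deck) i =
            PySem.List.slice (pvM a b deck) (some i.2) none ++
              PySem.List.slice (pvM a b deck) none (some i.2) by
            rw [slamStep, if_neg h0, if_pos h1],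
          show slamAff (deck.length : Int) (a, b) i =
            (a, (b - max (-(deck.length : Int)) (min (deck.length : Int) i.2)) %
              (deck.length : Int)) by
            rw [slamAff, if_neg h0, if_pos h1, PySem.Int.mod_eq_emod_of_pos hL],
          pvStepCUT hl hcop]
        exact ih _ _ hrest hcop
      · by_cases h2 : i.1 = 2
        · have hpar : IsCoprime (deck.length : Int) i.2 :=
            (Int.isCoprime_iff_gcd_eq_one.mpr (hg i (List.mem_cons_self ..) h2)).symm
          rw [show slamStep (pvM a b deck) i =
              slamIncLoop i.2 ((pvM a b deck).length : Int) (pvM a b deck)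
                (List.replicate (pvM a b deck).length 0) 0 by
              rw [slamStep, if_neg h0, if_neg h1, if_pos h2],
            show slamAff (deck.length : Int) (a, b) i =
              ((a * i.2) % (deck.length : Int), (b * i.2) % (deck.length : Int)) by
              rw [slamAff, if_neg h0, if_neg h1, if_pos h2,
                PySem.Int.mod_eq_emod_of_pos hL, PySem.Int.mod_eq_emod_of_pos hL],
            pvStepINC hl hcop hpar]
          exact ih _ _ hrest (pvCoprime_emod (hcop.mul_right hpar))
        · rw [show slamStep (pvM a b deck) i = pvM a b deck by
              rw [slamStep, if_neg h0, if_neg h1, if_neg h2],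
            show slamAff (deck.length : Int) (a, b) i = (a, b) by
              rw [slamAff, if_neg h0, if_neg h1, if_neg h2]]
          exact ih _ _ hrest hcop

theorem pvSlamStep_nil (i : Int × Int) : slamStep [] i = [] := by
  rw [slamStep]
  split_ifs <;> simp [PySem.List.slice, slamIncLoop]

theorem pvSlam_nil : ∀ ins : List (Int × Int), List.foldl slamStep [] ins = [] := by
  intro ins
  induction ins with
  | nil => rfl
  | cons i rest ih => rw [List.foldl_cons, pvSlamStep_nil, ih]

theorem pvBmat {a b L : Int} :
    ∀ (xs acc : List Int) (s : Nat),
      (PySem.List.enumerate xs (s : Int)).foldl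
          (fun res pc => res.set (PySem.Int.mod (a * pc.1 + b) L).toNat pc.2) acc =
        pvScatter
          ((List.range xs.length).map
            (fun t : Nat => (PySem.Int.mod (a * ((s + t : Nat) : Int) + b) L).toNat))
          xs acc := by
  intro xs
  induction xs with
  | nil => intro acc s; rfl
  | cons c rest ih =>
    intro acc s
    rw [PySem.List.enumerate_cons, List.foldl_cons]
    have hs1 : ((s : Int) + 1) = ((s + 1 : Nat) : Int) := by push_cast; ring
    rw [hs1, ih]
    rw [List.length_cons, List.range_succ_eq_map, List.map_cons, List.map_map]
    rw [pvScatter_cons]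
    have hhead : (PySem.Int.mod (a * ((s + 0 : Nat) : Int) + b) L).toNat
        = (PySem.Int.mod (a * (s : Int) + b) L).toNat := by norm_num
    rw [hhead]
    congr 1
    apply List.map_congr_left
    intro t _
    simp only [Function.comp_apply]
    congr 3
    push_cast
    ring

theorem pvBmat_top {a b : Int} {deck : List Int} (hl : 0 < deck.length) :
    (PySem.List.enumerate deck 0).foldl
        (fun res pc =>
          res.set (PySem.Int.mod (a * pc.1 + b) (deck.length : Int)).toNat pc.2)
        (List.replicate deck.length 0) = pvM a b deck := by
  have hL : (0 : Int) < (deck.length : Int) := by exact_mod_cast hl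
  have h0 : ((0 : Nat) : Int) = 0 := rfl
  rw [← h0, pvBmat, pvM]
  congr 1
  apply List.map_congr_left
  intro t _
  rw [PySem.Int.mod_eq_emod_of_pos hL]
  unfold pvPos
  norm_num

theorem slam_eq (deck : List Int) (instructions : List (Int × Int))
    (hpre : deck = [] ∨ ∀ p ∈ instructions, p.1 = 2 → Int.gcd p.2 deck.length = 1) :
    slam deck instructions = slam_alt deck instructions := by
  by_cases hnil : deck.length = 0
  · have hd : deck = [] := List.eq_nil_of_length_eq_zero hnil
    rw [slam, slam_alt, if_pos hnil, hd, pvSlam_nil]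
  · have hl : 0 < deck.length := by omega
    have hg : ∀ p ∈ instructions, p.1 = 2 → Int.gcd p.2 (deck.length : Int) = 1 := by
      rcases hpre with h | h
      · exact absurd (congrArg List.length h) (by simpa using hnil)
      · exact h
    have h1 : slam deck instructions = instructions.foldl slamStep (pvM 1 0 deck) := by
      rw [slam, ← pvM_base hl]
    rw [h1, pvRun hl instructions 1 0 hg isCoprime_one_right, slam_alt, if_neg hnil]
    exact (pvBmat_top hl).symm

-- ===== VERDICT (by name: the statement is the Claim_ definition above) =====
theorem slam_spec : Claim_equal_slam := by
  intro deck instructions _ hpre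
  exact slam_eq deck instructions hpre
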